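-- pv_equiv track=rewrite | github.com/Kevi-oss/Personal_Projects | Parser/dcom_rm.py | is_dated_comment
-- ===== SOURCE A (Python) =====
-- def is_dated_comment(line):
--     def contain_full_date(subline):
--         """Test if a subline contains a full date"""
--         # Subline is too short to contain a full date
--         if len(subline) < 10:
--             return False
--
--         # Pattern match DD/MM/YYYY
--         if subline[0].isdigit() and subline[1].isdigit() and subline[2] == "/" and \
--             subline[3].isdigit() and subline[4].isdigit() and subline[5] == "/" and \
--             subline[6].isdigit() and subline[7].isdigit() and subline[8].isdigit() and subline[9].isdigit():
--            return True
--
--         return False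
--
--     # Multi line comment can contain single line comment, must process multi line comment first.
--     i = line.find("/*")
--     if i < 0:
--         i = line.find("//")
--
--     i += 2  # Skip the comment characters
--
--     # Find full date by looking for the first number in full date
--     while i < len(line):
--         if line[i].isdigit() and contain_full_date(line[i:]):
--             return True
--         i += 1
--
--     return False
-- ===== SOURCE B (Python) =====
-- def _match_at(line, p):
--     """Is index p (a found slash) the day/month separator of a DD/MM/YYYY occurrence?"""
--     return (p + 7 < len(line)
--             and line[p - 2].isdigit() and line[p - 1].isdigit()
--             and line[p + 1].isdigit() and line[p + 2].isdigit()
--             and line[p + 3] == "/"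
--             and line[p + 4].isdigit() and line[p + 5].isdigit()
--             and line[p + 6].isdigit() and line[p + 7].isdigit())
--
-- def is_dated_comment(line):
--     i = line.find("/*")
--     if i < 0:
--         i = line.find("//")
--     i += 2  # skip the comment characters (the not-found fallback -1 + 2 = 1, as in A)
--     # the day's first slash can only occur at index >= i + 2:
--     # jump from slash to slash instead of scanning every index
--     p = line.find("/", i + 2)
--     while p != -1:
--         if _match_at(line, p):
--             return True
--         p = line.find("/", p + 1)
--     return False
-- ===== Notes on version B (the rewrite author's own statement) =====
-- stated objective: faster
-- what changed: Instead of testing the 10-char date pattern at every index after the comment marker, B jumps from slash to slash with str.find and checks each found slash as the day/month separator of DD/MM/YYYY (two digits before it, the rest after), so only slash positions are examined.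
import Mathlib
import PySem

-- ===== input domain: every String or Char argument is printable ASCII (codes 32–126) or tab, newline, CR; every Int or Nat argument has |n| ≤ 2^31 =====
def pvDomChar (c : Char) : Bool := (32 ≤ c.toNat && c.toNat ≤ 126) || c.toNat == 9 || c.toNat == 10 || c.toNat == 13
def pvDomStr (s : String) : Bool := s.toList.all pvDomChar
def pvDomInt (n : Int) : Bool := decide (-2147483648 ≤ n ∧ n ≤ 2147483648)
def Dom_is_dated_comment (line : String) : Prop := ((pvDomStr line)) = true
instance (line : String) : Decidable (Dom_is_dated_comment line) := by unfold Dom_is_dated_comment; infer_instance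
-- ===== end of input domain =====

-- B jumps from slash to slash with str.find and tests only those positions, instead of
-- A's index-by-index scan; objective: faster (a timing run measured B faster).

-- ===== PORT A =====
def pvContainFullDate (sub : List Char) : Bool :=
  if sub.length < 10 then false
  else if PySem.Chars.isdigit (PySem.List.pyGetD sub 0 ' ')
       && PySem.Chars.isdigit (PySem.List.pyGetD sub 1 ' ')
       && (PySem.List.pyGetD sub 2 ' ' == '/')
       && PySem.Chars.isdigit (PySem.List.pyGetD sub 3 ' ')
       && PySem.Chars.isdigit (PySem.List.pyGetD sub 4 ' ')
       && (PySem.List.pyGetD sub 5 ' ' == '/')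
       && PySem.Chars.isdigit (PySem.List.pyGetD sub 6 ' ')
       && PySem.Chars.isdigit (PySem.List.pyGetD sub 7 ' ')
       && PySem.Chars.isdigit (PySem.List.pyGetD sub 8 ' ')
       && PySem.Chars.isdigit (PySem.List.pyGetD sub 9 ' ')
  then true else false

-- A's while-loop; A's i is always ≥ 1 once incremented past the marker, so a Nat counter is exact
def pvLoopA (cs : List Char) (i : Nat) : Bool :=
  if _h : i < cs.length then
    if PySem.Chars.isdigit (PySem.List.pyGetD cs (i : Int) ' ')
        && pvContainFullDate (PySem.List.slice cs (some (i : Int)) none)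
    then true
    else pvLoopA cs (i + 1)
  else false
termination_by cs.length - i

def is_dated_comment (line : String) : Bool :=
  let cs := line.toList
  let i0 := PySem.Chars.find cs "/*".toList
  let i1 := if i0 < 0 then PySem.Chars.find cs "//".toList else i0
  -- i1 ≥ -1, so (i1 + 2).toNat = i1 + 2 exactly
  pvLoopA cs (i1 + 2).toNat

-- ===== PORT B =====
-- _match_at: is index p (a found slash) the day/month separator of a DD/MM/YYYY occurrence?
def pvMatchAt (cs : List Char) (p : Int) : Bool :=
  decide (p + 7 < (cs.length : Int))
  && PySem.Chars.isdigit (PySem.List.pyGetD cs (p - 2) ' ')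
  && PySem.Chars.isdigit (PySem.List.pyGetD cs (p - 1) ' ')
  && PySem.Chars.isdigit (PySem.List.pyGetD cs (p + 1) ' ')
  && PySem.Chars.isdigit (PySem.List.pyGetD cs (p + 2) ' ')
  && (PySem.List.pyGetD cs (p + 3) ' ' == '/')
  && PySem.Chars.isdigit (PySem.List.pyGetD cs (p + 4) ' ')
  && PySem.Chars.isdigit (PySem.List.pyGetD cs (p + 5) ' ')
  && PySem.Chars.isdigit (PySem.List.pyGetD cs (p + 6) ' ')
  && PySem.Chars.isdigit (PySem.List.pyGetD cs (p + 7) ' ')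

-- needed by pvScanB's decreasing_by: a found slash lies in [start, length)
theorem pvFindSlashFacts (cs : List Char) (start : Nat)
    (hq : PySem.Chars.findFrom cs ['/'] (start : Int) none ≠ -1) :
    (start : Int) ≤ PySem.Chars.findFrom cs ['/'] (start : Int) none ∧
    (PySem.Chars.findFrom cs ['/'] (start : Int) none).toNat < cs.length := by
  by_cases hle : start ≤ cs.length
  · obtain ⟨h1, h2, _⟩ := PySem.Chars.findFrom_natCast_spec cs ['/'] start hle hq
    refine ⟨h1, ?_⟩
    have hne : cs.drop (PySem.Chars.findFrom cs ['/'] (start : Int) none).toNat ≠ [] := by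
      intro h; rw [h] at h2; simp at h2
    have := List.drop_eq_nil_iff.not.mp hne
    omega
  · exfalso; apply hq
    simp [PySem.Chars.findFrom]
    omega

-- B's while-loop: try each slash at index ≥ start; B's start is always ≥ 3, so a Nat counter is exact
def pvScanB (cs : List Char) (start : Nat) : Bool :=
  if hp : PySem.Chars.findFrom cs ['/'] (start : Int) none = -1 then false
  else if pvMatchAt cs (PySem.Chars.findFrom cs ['/'] (start : Int) none) then true
  else pvScanB cs ((PySem.Chars.findFrom cs ['/'] (start : Int) none) + 1).toNat
termination_by cs.length + 1 - start
decreasing_by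
  have h := pvFindSlashFacts cs start hp
  omega

def is_dated_comment_alt (line : String) : Bool :=
  let cs := line.toList
  let i0 := PySem.Chars.find cs "/*".toList
  let i1 := if i0 < 0 then PySem.Chars.find cs "//".toList else i0
  pvScanB cs ((i1 + 2) + 2).toNat

-- ===== PRECONDITION & SPEC =====
def Spec_is_dated_comment (line : String) (out : Bool) : Prop := out = is_dated_comment_alt line
instance (line : String) (out : Bool) : Decidable (Spec_is_dated_comment line out) := by unfold Spec_is_dated_comment; infer_instance

-- ===== CLAIM (what is proved, stated in full; the proofs are below) =====
def Claim_equal_is_dated_comment : Prop := ∀ (line : String), Dom_is_dated_comment line → Spec_is_dated_comment line (is_dated_comment line)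

-- ===== LEMMAS AND PROOFS =====

-- the DD/MM/YYYY pattern starting at index j (proof-side characterisation)
def pvPatt (cs : List Char) (j : Nat) : Bool :=
  decide (j + 10 ≤ cs.length)
  && PySem.Chars.isdigit (cs.getD j ' ')
  && PySem.Chars.isdigit (cs.getD (j+1) ' ')
  && (cs.getD (j+2) ' ' == '/')
  && PySem.Chars.isdigit (cs.getD (j+3) ' ')
  && PySem.Chars.isdigit (cs.getD (j+4) ' ')
  && (cs.getD (j+5) ' ' == '/')
  && PySem.Chars.isdigit (cs.getD (j+6) ' ')
  && PySem.Chars.isdigit (cs.getD (j+7) ' ')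
  && PySem.Chars.isdigit (cs.getD (j+8) ' ')
  && PySem.Chars.isdigit (cs.getD (j+9) ' ')

-- A's loop condition at index i is exactly the pattern test at i
theorem pvCond_eq (cs : List Char) (i : Nat) :
    (PySem.Chars.isdigit (cs.getD i ' ') && pvContainFullDate (cs.drop i)) = pvPatt cs i := by
  have hg : ∀ k, (cs.drop i).getD k ' ' = cs.getD (i+k) ' ' := by
    intro k; simp [List.getD_eq_getElem?_getD, List.getElem?_drop]
  unfold pvContainFullDate pvPatt
  by_cases h : cs.length < i + 10
  · have h1 : (cs.drop i).length < 10 := by simp; omega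
    have h2 : ¬ (i + 10 ≤ cs.length) := by omega
    simp [h2]
    intros; omega
  · have h1 : ¬ ((cs.drop i).length < 10) := by simp; omega
    have h2 : i + 10 ≤ cs.length := by omega
    simp only [if_neg h1, PySem.List.pyGetD_ofNat', hg, h2, decide_true, Bool.true_and,
      Nat.add_zero]
    split_ifs with hc
    · simp only [Bool.and_true]
      cases hb : (PySem.Chars.isdigit (cs.getD i ' ')) <;> simp_all [Bool.and_assoc]
    · simp only [Bool.and_false]
      cases hb : (PySem.Chars.isdigit (cs.getD i ' ')) <;> simp_all [Bool.and_assoc]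

theorem pvLoopA_iff (cs : List Char) (i : Nat) :
    pvLoopA cs i = true ↔ ∃ j, i ≤ j ∧ pvPatt cs j = true := by
  fun_induction pvLoopA cs i with
  | case1 i h hc =>
    simp only [PySem.List.pyGetD_natCast, PySem.List.slice_from_natCast] at hc
    simp only [true_iff]
    exact ⟨i, le_refl i, by rw [← pvCond_eq]; exact hc⟩
  | case2 i h hc ih =>
    simp only [PySem.List.pyGetD_natCast, PySem.List.slice_from_natCast] at hc
    rw [ih]
    constructor
    · rintro ⟨j, hj, hp⟩; exact ⟨j, by omega, hp⟩
    · rintro ⟨j, hj, hp⟩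
      refine ⟨j, ?_, hp⟩
      rcases Nat.eq_or_lt_of_le hj with rfl | hlt
      · rw [← pvCond_eq] at hp; exact absurd hp hc
      · omega
  | case3 i h =>
    simp only [Bool.false_eq_true, false_iff]
    rintro ⟨j, hj, hp⟩
    unfold pvPatt at hp
    simp at hp
    omega

theorem pvSingle_prefix (a : Char) (l : List Char) : [a] <+: l ↔ l[0]? = some a := by
  cases l with
  | nil => simp
  | cons b t => simp [List.cons_prefix_cons, eq_comm]

theorem pvScanB_iff (cs : List Char) (start : Nat) :
    pvScanB cs start = true ↔
      ∃ p, start ≤ p ∧ ['/'] <+: cs.drop p ∧ pvMatchAt cs (p : Int) = true := by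
  fun_induction pvScanB cs start with
  | case1 start hp =>
    simp only [Bool.false_eq_true, false_iff]
    rintro ⟨p, h1, h2, _⟩
    have hplen : p < cs.length := by
      rcases h2 with ⟨t, ht⟩
      have := congrArg List.length ht
      simp at this; omega
    have hle : start ≤ cs.length := by omega
    apply (PySem.Chars.findFrom_natCast_eq_neg_one_iff cs ['/'] start hle).mp hp
    have hdd : cs.drop p = List.drop (p - start) (cs.drop start) := by
      rw [List.drop_drop]; congr 1; omega
    rw [hdd] at h2
    exact h2.isInfix.trans (List.drop_suffix _ _).isInfix
  | case2 start hp hm =>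
    simp only [true_iff]
    have hfacts := pvFindSlashFacts cs start hp
    have hle : start ≤ cs.length := by omega
    obtain ⟨h1, h2, _⟩ := PySem.Chars.findFrom_natCast_spec cs ['/'] start hle hp
    refine ⟨(PySem.Chars.findFrom cs ['/'] (start : Int) none).toNat, by omega, h2, ?_⟩
    rwa [Int.toNat_of_nonneg (by omega)]
  | case3 start hp hm ih =>
    rw [ih]
    have hfacts := pvFindSlashFacts cs start hp
    have hle : start ≤ cs.length := by omega
    obtain ⟨h1, h2, hmin⟩ := PySem.Chars.findFrom_natCast_spec cs ['/'] start hle hp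
    constructor
    · rintro ⟨p, hpge, hpre, hmat⟩
      exact ⟨p, by omega, hpre, hmat⟩
    · rintro ⟨p, hpge, hpre, hmat⟩
      refine ⟨p, ?_, hpre, hmat⟩
      by_contra hlt
      have hq0 : (0:Int) ≤ PySem.Chars.findFrom cs ['/'] (start : Int) none := by omega
      rcases Nat.lt_or_ge p (PySem.Chars.findFrom cs ['/'] (start : Int) none).toNat with h | h
      · exact hmin p hpge h hpre
      · have hpq : p = (PySem.Chars.findFrom cs ['/'] (start : Int) none).toNat := by omega
        apply hm
        rw [hpq] at hmat
        rwa [Int.toNat_of_nonneg hq0] at hmat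

-- a slash at index p with B's surrounding checks is exactly the pattern at p - 2
theorem pvMatch_patt (cs : List Char) (p : Nat) (h2 : 2 ≤ p) (hs : cs.getD p ' ' = '/') :
    pvMatchAt cs (p : Int) = pvPatt cs (p - 2) := by
  unfold pvMatchAt pvPatt
  rw [show ((p:Int) - 2) = ((p-2:Nat):Int) by omega,
      show ((p:Int) - 1) = ((p-1:Nat):Int) by omega,
      show ((p:Int) + 1) = ((p+1:Nat):Int) by push_cast; ring,
      show ((p:Int) + 2) = ((p+2:Nat):Int) by push_cast; ring,
      show ((p:Int) + 3) = ((p+3:Nat):Int) by push_cast; ring,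
      show ((p:Int) + 4) = ((p+4:Nat):Int) by push_cast; ring,
      show ((p:Int) + 5) = ((p+5:Nat):Int) by push_cast; ring,
      show ((p:Int) + 6) = ((p+6:Nat):Int) by push_cast; ring,
      show ((p:Int) + 7) = ((p+7:Nat):Int) by push_cast; ring]
  simp only [PySem.List.pyGetD_natCast]
  rw [show p-2+1 = p-1 by omega, show p-2+2 = p by omega, show p-2+3 = p+1 by omega,
      show p-2+4 = p+2 by omega, show p-2+5 = p+3 by omega, show p-2+6 = p+4 by omega,
      show p-2+7 = p+5 by omega, show p-2+8 = p+6 by omega, show p-2+9 = p+7 by omega,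
      show p-2+10 = p+8 by omega]
  rw [hs]
  have hd : decide (((p+7:Nat):Int) < (cs.length:Int)) = decide (p+8 ≤ cs.length) := by
    simp [decide_eq_decide]; omega
  rw [hd]
  simp only [beq_self_eq_true, Bool.and_true]

theorem pvMain (cs : List Char) (i : Nat) :
    pvLoopA cs i = pvScanB cs (i + 2) := by
  rw [Bool.eq_iff_iff, pvLoopA_iff, pvScanB_iff]
  constructor
  · rintro ⟨j, hj, hp⟩
    have hp' := hp
    unfold pvPatt at hp'
    simp only [Bool.and_eq_true, decide_eq_true_eq, beq_iff_eq] at hp'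
    have hlen : j + 10 ≤ cs.length := hp'.1.1.1.1.1.1.1.1.1.1
    have hsl : cs.getD (j+2) ' ' = '/' := hp'.1.1.1.1.1.1.1.2
    refine ⟨j + 2, by omega, ?_, ?_⟩
    · rw [pvSingle_prefix]
      rw [List.getElem?_drop, Nat.add_zero]
      rw [List.getElem?_eq_getElem (by omega)]
      rw [List.getD_eq_getElem?_getD, List.getElem?_eq_getElem (by omega)] at hsl
      simp_all
    · rw [pvMatch_patt cs (j+2) (by omega) hsl]
      simpa using hp
  · rintro ⟨p, hpge, hpre, hm⟩
    rw [pvSingle_prefix, List.getElem?_drop, Nat.add_zero] at hpre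
    have hplen : p < cs.length := (List.getElem?_eq_some_iff.mp hpre).1
    have hs : cs.getD p ' ' = '/' := by
      rw [List.getD_eq_getElem?_getD, hpre]; rfl
    rw [pvMatch_patt cs p (by omega) hs] at hm
    exact ⟨p - 2, by omega, hm⟩

-- ===== VERDICT (by name: the statement is the Claim_ definition above) =====
theorem is_dated_comment_spec : Claim_equal_is_dated_comment := by
  intro line _
  unfold Spec_is_dated_comment is_dated_comment is_dated_comment_alt
  show pvLoopA line.toList
        ((if PySem.Chars.find line.toList "/*".toList < 0
          then PySem.Chars.find line.toList "//".toList
          else PySem.Chars.find line.toList "/*".toList) + 2).toNat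
     = pvScanB line.toList
        (((if PySem.Chars.find line.toList "/*".toList < 0
          then PySem.Chars.find line.toList "//".toList
          else PySem.Chars.find line.toList "/*".toList) + 2) + 2).toNat
  have hge : ∀ sub : List Char, (-1:Int) ≤ PySem.Chars.find line.toList sub := by
    intro sub
    by_cases h : sub <:+: line.toList
    · have := (PySem.Chars.find_nonneg_iff line.toList sub).mpr h; omega
    · rw [(PySem.Chars.find_eq_neg_one_iff line.toList sub).mpr h]
  have h1 := hge "/*".toList
  have h2 := hge "//".toList
  set i1 := (if PySem.Chars.find line.toList "/*".toList < 0
          then PySem.Chars.find line.toList "//".toList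
          else PySem.Chars.find line.toList "/*".toList) with hi1
  have hge1 : (-1:Int) ≤ i1 := by rw [hi1]; split <;> assumption
  rw [show ((i1 + 2) + 2).toNat = (i1 + 2).toNat + 2 by omega]
  exact pvMain line.toList (i1 + 2).toNat
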